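-- pv_equiv track=rewrite | github.com/CROSS-signature/CROSS-implementation | Additional_Implementations/Parameter_Generation_Scripts/compute_derived_parameters.py | tree_offsets_and_nodes
-- ===== SOURCE A (Python) =====
-- from math import comb,log2,ceil,floor
--
-- def clog2(a):
--     return max(int(ceil(log2(a))), 1)
--
-- def tree_offsets_and_nodes(T):
--
--     # Full trees on the left half, so we can already count (i.e. subtract) these values as well as the root node
--     missing_nodes_per_level = [2**(i-1) for i in range(1, clog2(T)+1)]
--     missing_nodes_per_level.insert(0,0)
--
--     remaining_leaves = T - 2**(clog2(T)-1)
--     level = 1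
--
--     # Starting from the first level, we construct the tree in a way that the left
--     # subtree is always a full binary tree.
--     while(remaining_leaves > 0):
--         depth = 0
--         stree_found = False
--         while not stree_found:
--             if (remaining_leaves <= 2**depth):
--                 for i in range(depth, 0, -1):
--                     missing_nodes_per_level[level+i] -= 2**(i-1)
--                 remaining_leaves -= (2**clog2(remaining_leaves)) // 2
--
--                 # Subtract root and increase level for next iteration
--                 missing_nodes_per_level[level] -= 1
--                 level += 1
--                 stree_found = True
--             else:
--                 depth += 1
--
--     # The offsets are the missing nodes per level subtracted by the missing nodes of all previous levels, as this
--     # is already included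
--     offsets = [missing_nodes_per_level[i] for i in range(len(missing_nodes_per_level))]
--     for i in range(clog2(T), -1, -1):
--         for j in range(i):
--             offsets[i] -= offsets[j]
--
--     nodes_per_level = [2**i - missing_nodes_per_level[i] for i in range(clog2(T)+1)]
--     return offsets, nodes_per_level
-- ===== SOURCE B (Python) =====
-- def _depths(r):
--     # subtree depths emitted left to right, read directly off the binary
--     # representation of r: each leading set bit contributes one subtree of
--     # depth (bit position + 1); a power of two collapses into the descending
--     # run depth, depth-1, ..., 0.
--     if r <= 0:
--         return []
--     b = r.bit_length() - 1
--     if r != 1 << b: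
--         return [b + 1] + _depths(r - (1 << b))
--     return list(range(b, -1, -1))
--
--
-- def tree_offsets_and_nodes(T):
--     k = max((T - 1).bit_length(), 1)
--     missing = [0] + [1 << (i - 1) for i in range(1, k + 1)]
--
--     lvl = 1
--     for d in _depths(T - (1 << (k - 1))):
--         for i in range(d, 0, -1):
--             missing[lvl + i] -= 1 << (i - 1)
--         missing[lvl] -= 1
--         lvl += 1
--
--     offsets, prefix = [], 0
--     for m in missing:
--         offsets.append(m - prefix)
--         prefix += m
--
--     nodes_per_level = [(1 << i) - m for i, m in enumerate(missing)]
--     return offsets, nodes_per_level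
-- ===== Notes on version B (the rewrite author's own statement) =====
-- stated objective: alternative
-- what changed: B replaces A's per-subtree linear depth search (while/stree_found with repeated float clog2 calls) by a direct recursion over the binary representation of the remaining leaves, and A's quadratic offsets double loop by a single prefix-sum pass; k comes from bit_length instead of float log2.
import Mathlib
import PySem

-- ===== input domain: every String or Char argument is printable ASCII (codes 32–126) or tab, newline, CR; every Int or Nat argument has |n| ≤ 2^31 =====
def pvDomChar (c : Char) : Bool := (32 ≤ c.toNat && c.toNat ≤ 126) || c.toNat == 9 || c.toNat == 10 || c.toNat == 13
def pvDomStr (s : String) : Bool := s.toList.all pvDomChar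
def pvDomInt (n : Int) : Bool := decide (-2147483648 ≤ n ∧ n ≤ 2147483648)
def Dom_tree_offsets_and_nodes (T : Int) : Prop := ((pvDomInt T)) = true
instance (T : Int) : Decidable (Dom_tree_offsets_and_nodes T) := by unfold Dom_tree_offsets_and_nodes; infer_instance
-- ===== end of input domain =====

-- B replaces A's depth-searching while loop by a direct recursion over the binary
-- representation of the remaining leaves and A's quadratic offsets double loop by a
-- single prefix-sum pass (objective: alternative decomposition of the same cost).

-- shared helper: the Python statement `xs[i] -= v` (both sources contain it verbatim;
-- on Pre_ the index is always in range, checked by the differential test)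
def pvSubAt (xs : List Int) (i : Nat) (v : Int) : List Int :=
  xs.set i (xs.getD i 0 - v)

-- shared helper: the loop `for i in range(depth, 0, -1): miss[level+i] -= 2**(i-1)`
-- (identical lines in Source A and Source B)
def pvSubRun (miss : List Int) (lvl : Nat) : Nat → List Int
  | 0 => miss
  | d + 1 => pvSubRun (pvSubAt miss (lvl + (d + 1)) (2 ^ d)) lvl d

-- ===== PORT A =====
-- clog2(a) = max(ceil(log2(a)), 1); float log2/ceil is exact for 1 ≤ a ≤ 2^31+1,
-- where ceil(log2(a)) = bit_length(a-1); Python raises ValueError for a ≤ 0 (excluded by Pre_)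
def pvClog2 (a : Int) : Int := max (PySem.Int.bitLength (a - 1) : Int) 1

-- inner `while not stree_found` search for the smallest depth with r ≤ 2**depth
-- (fuel only makes it total; r.toNat steps always suffice on 0 < r)
def pvFindDepth (r : Int) (d : Nat) : Nat → Nat
  | 0 => d
  | fuel + 1 => if r ≤ 2 ^ d then d else pvFindDepth r (d + 1) fuel

theorem pvLoopA_dec (r : Int) (h : 0 < r) :
    (r - PySem.Int.floordiv (2 ^ (pvClog2 r).toNat) 2).toNat < r.toNat := by
  have hc : 1 ≤ (pvClog2 r).toNat := by
    unfold pvClog2; omega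
  have h2 : (1:Int) ≤ PySem.Int.floordiv (2 ^ (pvClog2 r).toNat) 2 := by
    rw [PySem.Int.floordiv_eq_ediv_of_pos (by norm_num)]
    have : (2:Int) ^ 1 ≤ 2 ^ (pvClog2 r).toNat := pow_le_pow_right₀ (by norm_num) hc
    omega
  omega

-- the outer `while remaining_leaves > 0` loop; state = (missing_nodes_per_level, remaining_leaves, level)
def pvLoopA (miss : List Int) (r : Int) (lvl : Nat) : List Int :=
  if h : 0 < r then
    pvLoopA (pvSubAt (pvSubRun miss lvl (pvFindDepth r 0 r.toNat)) lvl 1)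
      (r - PySem.Int.floordiv (2 ^ (pvClog2 r).toNat) 2) (lvl + 1)
  else miss
termination_by r.toNat
decreasing_by exact pvLoopA_dec r h

def tree_offsets_and_nodes (T : Int) : List Int × List Int :=
  let k := pvClog2 T
  let missing := 0 :: (PySem.List.pyRange 1 (k + 1) 1).map (fun i => (2:Int) ^ (i - 1).toNat)
  let miss := pvLoopA missing (T - 2 ^ (k - 1).toNat) 1
  let offsets0 := (List.range miss.length).map (fun i => miss.getD i 0)
  let offsets := (PySem.List.pyRange k (-1) (-1)).foldl
    (fun od i => (PySem.List.pyRange 0 i 1).foldl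
      (fun od j => pvSubAt od i.toNat (od.getD j.toNat 0)) od) offsets0
  let nodes := (PySem.List.pyRange 0 (k + 1) 1).map (fun i => (2:Int) ^ i.toNat - miss.getD i.toNat 0)
  (offsets, nodes)

-- ===== PORT B =====
theorem pvDepths_dec (r : Int) (h : ¬ r ≤ 0) :
    (r - 2 ^ (PySem.Int.bitLength r - 1)).toNat < r.toNat := by
  have : (1:Int) ≤ 2 ^ (PySem.Int.bitLength r - 1) := one_le_pow₀ (by norm_num)
  omega

-- _depths(r): subtree depths read off the binary representation of r
def pvDepths (r : Int) : List Nat :=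
  if h : r ≤ 0 then []
  else
    if r ≠ 2 ^ (PySem.Int.bitLength r - 1) then
      (PySem.Int.bitLength r - 1 + 1) :: pvDepths (r - 2 ^ (PySem.Int.bitLength r - 1))
    else (List.range (PySem.Int.bitLength r - 1 + 1)).reverse  -- list(range(b, -1, -1))
termination_by r.toNat
decreasing_by exact pvDepths_dec r h

def tree_offsets_and_nodes_alt (T : Int) : List Int × List Int :=
  let k := max (PySem.Int.bitLength (T - 1)) 1
  -- [0] + [1 << (i - 1) for i in range(1, k + 1)]
  let missing0 : List Int := 0 :: (List.range k).map (fun i => (2:Int) ^ i)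
  let missing := ((pvDepths (T - 2 ^ (k - 1))).foldl
    (fun (s : List Int × Nat) d => (pvSubAt (pvSubRun s.1 s.2 d) s.2 1, s.2 + 1))
    (missing0, 1)).1
  let offsets := (missing.foldl (fun (s : List Int × Int) m => (s.1 ++ [m - s.2], s.2 + m)) ([], 0)).1
  let nodes := (PySem.List.enumerate missing 0).map (fun p => (2:Int) ^ p.1.toNat - p.2)
  (offsets, nodes)

-- ===== PRECONDITION & SPEC =====
-- Pre_ excludes exactly T ≤ 0, on which A raises ValueError inside log2.
def Pre_tree_offsets_and_nodes (T : Int) : Prop := 1 ≤ T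
instance (T : Int) : Decidable (Pre_tree_offsets_and_nodes T) := by
  unfold Pre_tree_offsets_and_nodes; infer_instance

def pvWitness_tree_offsets_and_nodes : Int := 5

def Spec_tree_offsets_and_nodes (T : Int) (out : List Int × List Int) : Prop := out = tree_offsets_and_nodes_alt T
instance (T : Int) (out : List Int × List Int) : Decidable (Spec_tree_offsets_and_nodes T out) := by unfold Spec_tree_offsets_and_nodes; infer_instance

-- ===== CLAIM (what is proved, stated in full; the proofs are below) =====
def Claim_equal_tree_offsets_and_nodes : Prop := ∀ (T : Int), Dom_tree_offsets_and_nodes T → Pre_tree_offsets_and_nodes T → Spec_tree_offsets_and_nodes T (tree_offsets_and_nodes T)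

-- ===== LEMMAS AND PROOFS =====

-- bitLength facts specific to these two ports


theorem pv_bl_le_iff (m : Int) (hm : 0 ≤ m) (d : Nat) :
    PySem.Int.bitLength m ≤ d ↔ m < 2 ^ d := by
  have hcast : ((2:Nat) ^ d : Int) = (2:Int) ^ d := by push_cast; ring
  have habs : (m.natAbs : Int) = m := Int.natAbs_of_nonneg hm
  constructor
  · intro h
    have h1 := PySem.Int.lt_two_pow_bitLength m
    have h2 : m.natAbs < 2 ^ d := lt_of_lt_of_le h1 (Nat.pow_le_pow_right (by norm_num) h)
    have := (Int.ofNat_lt.mpr h2)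
    omega
  · intro h
    by_contra hc
    push_neg at hc
    have hm0 : m ≠ 0 := by
      rintro rfl
      simp [PySem.Int.bitLength_zero] at hc
    have h2 := PySem.Int.two_pow_bitLength_le m hm0
    have h3 : 2 ^ d ≤ 2 ^ (PySem.Int.bitLength m - 1) :=
      Nat.pow_le_pow_right (by norm_num) (by omega)
    have h4 : 2 ^ d ≤ m.natAbs := le_trans h3 h2
    have := Int.ofNat_le.mpr h4
    omega

theorem pv_bl_pos (m : Int) (hm : 1 ≤ m) : 1 ≤ PySem.Int.bitLength m := by
  by_contra h
  have : PySem.Int.bitLength m ≤ 0 := by omega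
  have := (pv_bl_le_iff m (by omega) 0).1 this
  omega

theorem pv_two_pow_le (r : Int) (h : 0 < r) : (2:Int) ^ (PySem.Int.bitLength r - 1) ≤ r := by
  have h2 := PySem.Int.two_pow_bitLength_le r (by omega)
  have habs : (r.natAbs : Int) = r := Int.natAbs_of_nonneg (by omega)
  have h3 := Int.ofNat_le.mpr h2
  have hcast : (((2:Nat) ^ (PySem.Int.bitLength r - 1) : Nat) : Int) = (2:Int) ^ (PySem.Int.bitLength r - 1) := by
    push_cast; ring
  omega

theorem pv_lt_two_pow_bl (r : Int) (h : 0 ≤ r) : r < (2:Int) ^ (PySem.Int.bitLength r) := by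
  have h1 := PySem.Int.lt_two_pow_bitLength r
  have h3 := Int.ofNat_lt.mpr h1
  have hcast : (((2:Nat) ^ PySem.Int.bitLength r : Nat) : Int) = (2:Int) ^ PySem.Int.bitLength r := by
    push_cast; ring
  have habs : (r.natAbs : Int) = r := Int.natAbs_of_nonneg h
  omega

theorem pv_bl_pred_pow (b : Nat) : PySem.Int.bitLength ((2:Int) ^ b - 1) = b := by
  have hpos : (0:Int) < 2 ^ b := by positivity
  have h1 : PySem.Int.bitLength ((2:Int) ^ b - 1) ≤ b :=
    (pv_bl_le_iff _ (by
      have : (1:Int) ≤ 2 ^ b := one_le_pow₀ (by norm_num)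
      omega) _).2 (by omega)
  rcases Nat.eq_zero_or_pos b with hb | hb
  · subst hb; simpa using h1
  · have h2 : ¬ PySem.Int.bitLength ((2:Int) ^ b - 1) ≤ b - 1 := by
      rw [pv_bl_le_iff _ (by
        have : (1:Int) ≤ 2 ^ b := one_le_pow₀ (by norm_num)
        omega)]
      push_neg
      have : (2:Int) ^ (b-1) * 2 = 2 ^ b := by
        rw [← pow_succ]; congr 1; omega
      have h3 : (1:Int) ≤ 2 ^ (b-1) := one_le_pow₀ (by norm_num)
      omega
    omega

theorem pv_floordiv_pow (c : Nat) (hc : 1 ≤ c) :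
    PySem.Int.floordiv ((2:Int) ^ c) 2 = 2 ^ (c - 1) := by
  rw [PySem.Int.floordiv_eq_ediv_of_pos (by norm_num)]
  obtain ⟨m, rfl⟩ : ∃ m, c = m + 1 := ⟨c - 1, by omega⟩
  rw [pow_succ]
  simp

theorem pv_findDepth_eq (r : Int) (hr : 1 ≤ r) (d fuel : Nat)
    (hd : d ≤ PySem.Int.bitLength (r - 1))
    (hf : PySem.Int.bitLength (r - 1) ≤ d + fuel) :
    pvFindDepth r d fuel = PySem.Int.bitLength (r - 1) := by
  induction fuel generalizing d with
  | zero => unfold pvFindDepth; omega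
  | succ n ih =>
    unfold pvFindDepth
    by_cases h : r ≤ 2 ^ d
    · have hle : PySem.Int.bitLength (r - 1) ≤ d :=
        (pv_bl_le_iff (r - 1) (by omega) d).2 (by omega)
      simp only [if_pos h]
      omega
    · have hgt : ¬ PySem.Int.bitLength (r - 1) ≤ d := by
        rw [pv_bl_le_iff (r - 1) (by omega) d]; omega
      simp only [if_neg h]
      exact ih (d + 1) (by omega) (by omega)

theorem pv_findDepth_top (r : Int) (hr : 1 ≤ r) :
    pvFindDepth r 0 r.toNat = PySem.Int.bitLength (r - 1) := by
  apply pv_findDepth_eq r hr 0 r.toNat (by omega)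
  have h2 : r.toNat < 2 ^ r.toNat := Nat.lt_two_pow_self
  have h3 := Int.ofNat_lt.mpr h2
  have hcast : (((2:Nat) ^ r.toNat : Nat) : Int) = (2:Int) ^ r.toNat := by push_cast; ring
  have hlt : (r - 1) < (2:Int) ^ r.toNat := by omega
  have := (pv_bl_le_iff (r - 1) (by omega) r.toNat).2 hlt
  omega

-- the per-iteration state transformer shared by both loop bodies
def pvStep (s : List Int × Nat) (d : Nat) : List Int × Nat :=
  (pvSubAt (pvSubRun s.1 s.2 d) s.2 1, s.2 + 1)

theorem pv_loop_pow (b : Nat) : ∀ (miss : List Int) (lvl : Nat),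
    pvLoopA miss ((2:Int) ^ b) lvl = (((List.range (b + 1)).reverse).foldl pvStep (miss, lvl)).1 := by
  induction b with
  | zero =>
    intro miss lvl
    rw [pow_zero, pvLoopA, dif_pos one_pos]
    have h1 : pvFindDepth 1 0 (Int.toNat 1) = 0 := by decide
    have h2 : (1:Int) - PySem.Int.floordiv (2 ^ (pvClog2 1).toNat) 2 = 0 := by decide
    rw [h1, h2, pvLoopA, dif_neg (by norm_num)]
    simp [pvStep, pvSubRun]
  | succ b ih =>
    intro miss lvl
    have hpos : (0:Int) < 2 ^ (b + 1) := by positivity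
    rw [pvLoopA, dif_pos hpos]
    rw [pv_findDepth_top _ (one_le_pow₀ (by norm_num)), pv_bl_pred_pow]
    have hclog : (pvClog2 ((2:Int) ^ (b + 1))).toNat = b + 1 := by
      unfold pvClog2
      rw [pv_bl_pred_pow]
      omega
    rw [hclog, pv_floordiv_pow (b + 1) (by omega)]
    simp only [Nat.add_sub_cancel]
    have hr' : (2:Int) ^ (b + 1) - 2 ^ b = 2 ^ b := by rw [pow_succ]; ring
    rw [List.range_succ, List.reverse_append, List.reverse_singleton, List.singleton_append,
      List.foldl_cons, hr', ih]
    rfl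

theorem pv_loop_eq (r : Int) : ∀ (miss : List Int) (lvl : Nat),
    pvLoopA miss r lvl = ((pvDepths r).foldl pvStep (miss, lvl)).1 := by
  intro miss lvl
  by_cases h : r ≤ 0
  · rw [pvLoopA, pvDepths, dif_neg (by omega), dif_pos h]
    simp
  · have hr : 0 < r := by omega
    by_cases hpow : r = 2 ^ (PySem.Int.bitLength r - 1)
    · rw [pvDepths, dif_neg h, if_neg (not_not_intro hpow)]
      conv_lhs => rw [hpow]
      rw [pv_loop_pow]
    · rw [pvDepths, dif_neg h, if_pos hpow]
      have hbl1 : 1 ≤ PySem.Int.bitLength r := pv_bl_pos r (by omega)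
      have hble : (2:Int) ^ (PySem.Int.bitLength r - 1) ≤ r := pv_two_pow_le r hr
      have hlt : (2:Int) ^ (PySem.Int.bitLength r - 1) < r :=
        hble.lt_of_ne (fun he => hpow he.symm)
      have hup : r < (2:Int) ^ (PySem.Int.bitLength r - 1 + 1) := by
        have h2 := pv_lt_two_pow_bl r (le_of_lt hr)
        have he : PySem.Int.bitLength r - 1 + 1 = PySem.Int.bitLength r := by omega
        rw [he]
        exact h2
      have hblpred : PySem.Int.bitLength (r - 1) = PySem.Int.bitLength r - 1 + 1 := by
        have hle : PySem.Int.bitLength (r - 1) ≤ PySem.Int.bitLength r - 1 + 1 :=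
          (pv_bl_le_iff (r - 1) (by omega) _).2 (by omega)
        have hgt : ¬ PySem.Int.bitLength (r - 1) ≤ PySem.Int.bitLength r - 1 := by
          rw [pv_bl_le_iff (r - 1) (by omega)]
          omega
        omega
      rw [pvLoopA, dif_pos hr, pv_findDepth_top r (by omega), hblpred]
      have hclog : (pvClog2 r).toNat = PySem.Int.bitLength r - 1 + 1 := by
        unfold pvClog2
        rw [hblpred]
        omega
      rw [hclog, pv_floordiv_pow _ (by omega)]
      simp only [Nat.add_sub_cancel]
      rw [List.foldl_cons]
      rw [pv_loop_eq (r - 2 ^ (PySem.Int.bitLength r - 1))]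
      rfl
termination_by r.toNat
decreasing_by exact pvDepths_dec r h

theorem pvSubAt_length (xs : List Int) (i : Nat) (v : Int) :
    (pvSubAt xs i v).length = xs.length := by simp [pvSubAt]

theorem pvSubRun_length (d : Nat) : ∀ (miss : List Int) (lvl : Nat),
    (pvSubRun miss lvl d).length = miss.length := by
  induction d with
  | zero => intro miss lvl; rfl
  | succ d ih => intro miss lvl; rw [pvSubRun, ih, pvSubAt_length]

theorem pv_fold_len (ds : List Nat) : ∀ (miss : List Int) (lvl : Nat),
    (((ds.foldl pvStep (miss, lvl))).1).length = miss.length := by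
  induction ds with
  | nil => intro miss lvl; rfl
  | cons d t ih =>
    intro miss lvl
    rw [List.foldl_cons]
    show ((t.foldl pvStep (pvStep (miss, lvl) d)).1).length = miss.length
    rw [ih, pvStep, pvSubAt_length, pvSubRun_length]

-- the prefix-sum description of the offsets
def pvSpecOff : List Int → Int → List Int
  | [], _ => []
  | m :: t, p => (m - p) :: pvSpecOff t (p + m)

theorem pv_prefix_fold (xs : List Int) : ∀ (acc : List Int) (p : Int),
    (xs.foldl (fun (s : List Int × Int) m => (s.1 ++ [m - s.2], s.2 + m)) (acc, p)).1
      = acc ++ pvSpecOff xs p := by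
  induction xs with
  | nil => intro acc p; simp [pvSpecOff]
  | cons m t ih =>
    intro acc p
    rw [List.foldl_cons]
    show (t.foldl _ (acc ++ [m - p], p + m)).1 = _
    rw [ih]
    simp [pvSpecOff]

theorem pvSpecOff_length (xs : List Int) : ∀ (p : Int), (pvSpecOff xs p).length = xs.length := by
  induction xs with
  | nil => intro p; rfl
  | cons m t ih => intro p; rw [pvSpecOff]; simp [ih]

theorem pvSpecOff_getElem (xs : List Int) : ∀ (p : Int) (j : Nat) (h : j < xs.length),
    (pvSpecOff xs p)[j]'(by rw [pvSpecOff_length]; exact h) = xs[j] - (p + ((xs.take j).sum)) := by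
  induction xs with
  | nil => intro p j h; simp at h
  | cons m t ih =>
    intro p j h
    cases j with
    | zero => simp [pvSpecOff]
    | succ j =>
      simp only [pvSpecOff, List.getElem_cons_succ, List.take_succ_cons, List.sum_cons]
      rw [ih (p + m) j (by simpa using h)]
      ring

theorem pv_inner_fold (i : Nat) : ∀ (n : Nat) (off : List Int), n ≤ i → i < off.length →
    (List.range n).foldl (fun o (j : Nat) => pvSubAt o i (o.getD j 0)) off
      = off.set i (off.getD i 0 - (off.take n).sum) := by
  intro n
  induction n with
  | zero =>
    intro off _ hi
    rw [List.getD_eq_getElem _ _ hi]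
    simp [List.set_getElem_self]
  | succ n ih =>
    intro off hn hi
    rw [List.range_succ, List.foldl_append, ih off (by omega) hi]
    simp only [List.foldl_cons, List.foldl_nil]
    rw [pvSubAt]
    have hne : n ≠ i := by omega
    have hlen : n < (off.set i (off.getD i 0 - (off.take n).sum)).length := by simp; omega
    rw [List.getD_eq_getElem _ _ hlen, List.getElem_set_ne (by omega)]
    have hlen2 : i < (off.set i (off.getD i 0 - (off.take n).sum)).length := by simp; omega
    rw [List.getD_eq_getElem _ _ hlen2, List.getElem_set_self (by simpa using hi)]
    rw [List.set_set]
    rw [List.sum_take_succ off n (by omega)]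
    congr 1
    ring

def pvOuterF (l : Nat) (off : List Int) : List Int :=
  ((List.range l).reverse).foldl
    (fun o (i : Nat) => (List.range i).foldl (fun o (j : Nat) => pvSubAt o i (o.getD j 0)) o) off

theorem pv_outer_fold (l : Nat) : ∀ (off : List Int), l ≤ off.length →
    (pvOuterF l off).length = off.length ∧
    (∀ (j : Nat), j < off.length →
      (pvOuterF l off)[j]? = some (if j < l then off[j]! - (off.take j).sum else off[j]!)) := by
  induction l with
  | zero =>
    intro off _
    refine ⟨rfl, fun j hj => ?_⟩
    simp [pvOuterF, List.getElem?_eq_getElem hj, getElem!_pos off j hj]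
  | succ l ih =>
    intro off hl
    have hl' : l < off.length := by omega
    have hstep : pvOuterF (l + 1) off = pvOuterF l (off.set l (off.getD l 0 - (off.take l).sum)) := by
      unfold pvOuterF
      rw [List.range_succ, List.reverse_append, List.reverse_singleton, List.singleton_append,
        List.foldl_cons, pv_inner_fold l l off (le_refl l) hl']
    set off1 := off.set l (off.getD l 0 - (off.take l).sum) with hoff1
    have hlen1 : off1.length = off.length := by simp [hoff1]
    obtain ⟨ihlen, ihget⟩ := ih off1 (by omega)
    refine ⟨by rw [hstep, ihlen, hlen1], fun j hj => ?_⟩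
    rw [hstep, ihget j (by omega)]
    congr 1
    have hj1 : j < off1.length := by omega
    have hgj : off1[j]! = off1[j]'hj1 := getElem!_pos off1 j hj1
    have hgj' : off[j]! = off[j]'hj := getElem!_pos off j hj
    by_cases hjl : j < l
    · have h1 : off1[j]'hj1 = off[j]'hj := by
        simp [hoff1, List.getElem_set_ne (by omega : l ≠ j)]
      have h2 : off1.take j = off.take j := by
        rw [hoff1, List.take_set_of_le (by omega)]
      rw [if_pos hjl, if_pos (by omega : j < l + 1), hgj, hgj', h1, h2]
    · by_cases hje : j = l
      · subst hje
        rw [if_neg hjl, if_pos (by omega), hgj, hgj']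
        have h1 : off1[j]'hj1 = off.getD j 0 - (off.take j).sum := by
          simp [hoff1]
        rw [h1, List.getD_eq_getElem _ _ hj]
      · have h1 : off1[j]'hj1 = off[j]'hj := by
          simp [hoff1, List.getElem_set_ne (by omega : l ≠ j)]
        rw [if_neg hjl, if_neg (by omega), hgj, hgj', h1]

theorem pv_map_getD_range (xs : List Int) :
    (List.range xs.length).map (fun i => xs.getD i 0) = xs := by
  apply List.ext_getElem (by simp)
  intro i h1 h2
  simp [List.getElem?_eq_getElem h2]

theorem pv_countdown (K : Nat) :
    PySem.List.pyRange (K : Int) (-1) (-1) = ((List.range (K + 1)).reverse).map (fun n : Nat => (n : Int)) := by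
  rw [PySem.List.pyRange_neg_one]
  have hlen : ((K : Int) - (-1)).toNat = K + 1 := by omega
  rw [hlen]
  apply List.ext_getElem (by simp)
  intro j h1 h2
  have hj : j < K + 1 := by simpa using h1
  simp only [List.getElem_map, List.getElem_range, List.getElem_reverse, List.length_range]
  have : K + 1 - 1 - j = K - j := by omega
  rw [this]
  omega

theorem pv_outer_conv (K : Nat) (off : List Int) :
    (PySem.List.pyRange (K : Int) (-1) (-1)).foldl
      (fun od i => (PySem.List.pyRange 0 i 1).foldl
        (fun od j => pvSubAt od i.toNat (od.getD j.toNat 0)) od) off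
      = pvOuterF (K + 1) off := by
  rw [pv_countdown, List.foldl_map]
  unfold pvOuterF
  congr 1
  funext o i
  rw [PySem.List.pyRange_one]
  have h0 : ((i : Int) - 0).toNat = i := by omega
  rw [h0, List.foldl_map]
  congr 1
  funext o' j
  simp

theorem pv_offsets_eq (off : List Int) : pvOuterF off.length off = pvSpecOff off 0 := by
  obtain ⟨hlen, hget⟩ := pv_outer_fold off.length off (le_refl _)
  apply List.ext_getElem (by rw [hlen, pvSpecOff_length])
  intro i h1 h2
  have h3 : i < off.length := by rw [hlen] at h1; exact h1
  have h4 := hget i h3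
  rw [List.getElem?_eq_getElem h1, if_pos h3, getElem!_pos off i h3] at h4
  have h5 := pvSpecOff_getElem off 0 i h3
  rw [Option.some.injEq] at h4
  rw [h4]
  rw [h5]
  ring

theorem pv_nodes_conv (K : Nat) (miss : List Int) (hm : miss.length = K + 1) :
    (PySem.List.pyRange 0 ((K : Int) + 1) 1).map
        (fun i => (2:Int) ^ i.toNat - miss.getD i.toNat 0)
      = (PySem.List.enumerate miss 0).map (fun p => (2:Int) ^ p.1.toNat - p.2) := by
  rw [PySem.List.pyRange_one]
  have hlen : (((K : Int) + 1) - 0).toNat = K + 1 := by omega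
  rw [hlen]
  apply List.ext_getElem (by simp [PySem.List.length_enumerate, hm])
  intro j h1 h2
  have hj : j < K + 1 := by simpa using h1
  have hjm : j < miss.length := by omega
  simp only [List.getElem_map, List.getElem_range, PySem.List.getElem_enumerate]
  have ha : ((0 : Int) + (j : Int)).toNat = j := by omega
  rw [ha]
  rw [List.getD_eq_getElem _ _ hjm]

theorem pv_init_eq (K : Nat) :
    (PySem.List.pyRange 1 ((K : Int) + 1) 1).map (fun i => (2:Int) ^ (i - 1).toNat)
      = (List.range K).map (fun i => (2:Int) ^ i) := by
  rw [PySem.List.pyRange_one]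
  have h0 : ((K : Int) + 1 - 1).toNat = K := by omega
  rw [h0, List.map_map]
  apply List.map_congr_left
  intro a _
  simp only [Function.comp_apply]
  congr 1
  omega

-- ===== VERDICT (by name: the statement is the Claim_ definition above) =====
theorem tree_offsets_and_nodes_spec : Claim_equal_tree_offsets_and_nodes := by
  intro T _ hT
  have hT1 : 1 ≤ T := hT
  unfold Spec_tree_offsets_and_nodes
  simp only [tree_offsets_and_nodes, tree_offsets_and_nodes_alt]
  have hk : pvClog2 T = ((max (PySem.Int.bitLength (T - 1)) 1 : Nat) : Int) := by
    unfold pvClog2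
    omega
  set K := max (PySem.Int.bitLength (T - 1)) 1 with hK
  have hK1 : 1 ≤ K := le_max_right _ _
  rw [hk]
  have hexp : (((K : Int)) - 1).toNat = K - 1 := by omega
  rw [hexp, pv_init_eq K]
  set miss0 : List Int := 0 :: (List.range K).map (fun i => (2:Int) ^ i) with hmiss0
  rw [pv_loop_eq]
  have hstep : (fun (s : List Int × Nat) d => (pvSubAt (pvSubRun s.1 s.2 d) s.2 1, s.2 + 1)) = pvStep := rfl
  rw [hstep]
  set miss := ((pvDepths (T - 2 ^ (K - 1))).foldl pvStep (miss0, 1)).1 with hmiss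
  have hmlen : miss.length = K + 1 := by
    rw [hmiss, pv_fold_len, hmiss0]
    simp
  rw [pv_map_getD_range, pv_outer_conv K miss]
  rw [pv_prefix_fold miss [] 0, List.nil_append]
  rw [← hmlen, pv_offsets_eq miss]
  rw [pv_nodes_conv K miss hmlen]
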